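-- pv_equiv track=rewrite | github.com/kshitiz305/value | app.py | industry_matches
-- ===== SOURCE A (Python) =====
-- def _norm(s: str) -> str:
--     if not s:
--         return ""
--     s = s.lower()
--     s = s.replace("&", "and")
--     for ch in [",", "/", "-", "(", ")", ".", "'"]:
--         s = s.replace(ch, " ")
--     s = " ".join(s.split())
--     return s
--
-- INDUSTRY_SYNONYMS = {
--     # Retail & Consumer Defensive
--     "discount stores": {"discount stores", "discount retail", "general merchandise stores", "hypermarkets and super centers", "warehouse clubs and superstores"},
--     "hypermarkets and super centers": {"hypermarkets and super centers", "discount stores", "general merchandise stores", "warehouse clubs and superstores"},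
--     "grocery stores": {"grocery stores", "supermarkets", "food retailers", "food and staples retailing"},
--     "department stores": {"department stores"},
--     "drug retailers": {"drug retailers", "pharmacies and drug stores"},
--     "internet retail": {"internet retail", "e commerce", "internet and direct marketing retail"},
--     "packaged foods": {"packaged foods", "packaged foods and meats", "processed foods"},
--     "beverages non alcoholic": {"beverages non alcoholic", "non alcoholic beverages"},
--     "beverages breweries": {"beverages breweries", "brewers"},
--     "household and personal products": {"household and personal products"},
--     # Lodging / Casinos
--     "resorts and casinos": {"resorts and casinos", "casinos and gaming"},
--     "hotels and motels": {"hotels and motels", "lodging"},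
--     # Tech buckets (kept tight)
--     "consumer electronics": {"consumer electronics", "computer hardware"},
--     "software infrastructure": {"software infrastructure", "software"},
--     "semiconductors": {"semiconductors", "semiconductor equipment and materials"},
-- }
--
-- def industry_matches(anchor_industry: str, candidate_industry: str) -> bool:
--     a = _norm(anchor_industry)
--     c = _norm(candidate_industry)
--     if not a or not c:
--         return False
--     if a == c:
--         return True
--     # synonym sets
--     for key, group in INDUSTRY_SYNONYMS.items():
--         if a in group and c in group:
--             return True
--     return False
-- ===== SOURCE B (Python) =====
-- _GROUPS = [
--     ["discount stores", "discount retail", "general merchandise stores", "hypermarkets and super centers", "warehouse clubs and superstores"],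
--     ["hypermarkets and super centers", "discount stores", "general merchandise stores", "warehouse clubs and superstores"],
--     ["grocery stores", "supermarkets", "food retailers", "food and staples retailing"],
--     ["department stores"],
--     ["drug retailers", "pharmacies and drug stores"],
--     ["internet retail", "e commerce", "internet and direct marketing retail"],
--     ["packaged foods", "packaged foods and meats", "processed foods"],
--     ["beverages non alcoholic", "non alcoholic beverages"],
--     ["beverages breweries", "brewers"],
--     ["household and personal products"],
--     ["resorts and casinos", "casinos and gaming"],
--     ["hotels and motels", "lodging"],
--     ["consumer electronics", "computer hardware"],
--     ["software infrastructure", "software"],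
--     ["semiconductors", "semiconductor equipment and materials"],
-- ]
--
-- # phrase -> set of all phrases sharing a synonym group with it, built once
-- _MATCHES = {}
-- for _grp in _GROUPS:
--     for _p in _grp:
--         _MATCHES.setdefault(_p, set()).update(_grp)
--
-- def _norm1(s: str) -> str:
--     # one pass: lowercase, expand '&' to 'and', break words on whitespace/punctuation
--     words = []
--     cur = ""
--     for ch in s:
--         if ch.isspace() or ch in ",/-().'":
--             if cur:
--                 words.append(cur)
--                 cur = ""
--         elif ch == "&":
--             cur = cur + "and"
--         else:
--             cur = cur + ch.lower()
--     if cur: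
--         words.append(cur)
--     return " ".join(words)
--
-- def industry_matches(anchor_industry: str, candidate_industry: str) -> bool:
--     a = _norm1(anchor_industry)
--     c = _norm1(candidate_industry)
--     if not a or not c:
--         return False
--     return a == c or c in _MATCHES.get(a, frozenset())
-- ===== Notes on version B (the rewrite author's own statement) =====
-- stated objective: alternative
-- what changed: Normalization is done in one character pass with a word accumulator instead of A's staged replace/split/join passes, and the per-call scan over all synonym groups is replaced by a module-level precomputed phrase-to-matchset dict consulted with one lookup and one membership test; the index removes the group scan but the interpreted single-pass normalizer trades away the speed of CPython's C string methods on long strings.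
import Mathlib
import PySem

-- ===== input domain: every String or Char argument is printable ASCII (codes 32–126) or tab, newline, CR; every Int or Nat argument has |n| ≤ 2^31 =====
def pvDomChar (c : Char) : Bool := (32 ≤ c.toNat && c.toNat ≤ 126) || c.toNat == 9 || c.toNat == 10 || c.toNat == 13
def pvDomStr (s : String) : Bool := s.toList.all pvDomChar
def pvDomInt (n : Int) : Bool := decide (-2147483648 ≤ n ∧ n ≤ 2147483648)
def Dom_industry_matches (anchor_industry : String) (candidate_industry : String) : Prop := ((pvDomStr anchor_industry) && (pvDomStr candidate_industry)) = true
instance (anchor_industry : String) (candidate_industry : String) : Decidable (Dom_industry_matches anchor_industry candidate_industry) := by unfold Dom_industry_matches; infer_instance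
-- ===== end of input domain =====

-- B normalizes in ONE character pass (word accumulator) instead of A's staged replace/split/join
-- passes, and replaces A's per-call scan over all synonym groups by a precomputed phrase → match-set
-- dict consulted with one lookup and one membership test; objective: alternative (same result by a
-- genuinely different traversal; not measured faster).

-- ===== PORT A =====
-- helper _norm of A: staged passes (lower, replace '&', replace each punctuation, split+join)
def pvNorm (s : String) : String :=
  if s = "" then ""
  else
    let s1 := PySem.Str.lower s
    let s2 := PySem.Str.replace s1 "&" "and"
    let s3 := [",", "/", "-", "(", ")", ".", "'"].foldl (fun t ch => PySem.Str.replace t ch " ") s2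
    PySem.Str.join " " (PySem.Str.split₀ s3)

-- INDUSTRY_SYNONYMS as its items list (dict with distinct keys, values are Python sets)
def pvSynonyms : List (String × PySem.Set String) := [
  ("discount stores", PySem.Set.ofList ["discount stores", "discount retail", "general merchandise stores", "hypermarkets and super centers", "warehouse clubs and superstores"]),
  ("hypermarkets and super centers", PySem.Set.ofList ["hypermarkets and super centers", "discount stores", "general merchandise stores", "warehouse clubs and superstores"]),
  ("grocery stores", PySem.Set.ofList ["grocery stores", "supermarkets", "food retailers", "food and staples retailing"]),
  ("department stores", PySem.Set.ofList ["department stores"]),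
  ("drug retailers", PySem.Set.ofList ["drug retailers", "pharmacies and drug stores"]),
  ("internet retail", PySem.Set.ofList ["internet retail", "e commerce", "internet and direct marketing retail"]),
  ("packaged foods", PySem.Set.ofList ["packaged foods", "packaged foods and meats", "processed foods"]),
  ("beverages non alcoholic", PySem.Set.ofList ["beverages non alcoholic", "non alcoholic beverages"]),
  ("beverages breweries", PySem.Set.ofList ["beverages breweries", "brewers"]),
  ("household and personal products", PySem.Set.ofList ["household and personal products"]),
  ("resorts and casinos", PySem.Set.ofList ["resorts and casinos", "casinos and gaming"]),
  ("hotels and motels", PySem.Set.ofList ["hotels and motels", "lodging"]),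
  ("consumer electronics", PySem.Set.ofList ["consumer electronics", "computer hardware"]),
  ("software infrastructure", PySem.Set.ofList ["software infrastructure", "software"]),
  ("semiconductors", PySem.Set.ofList ["semiconductors", "semiconductor equipment and materials"])]

def industry_matches (anchor_industry : String) (candidate_industry : String) : Bool :=
  let a := pvNorm anchor_industry
  let c := pvNorm candidate_industry
  if a = "" ∨ c = "" then false
  else if a = c then true
  else pvSynonyms.any (fun kg => PySem.Set.contains kg.2 a && PySem.Set.contains kg.2 c)

-- ===== PORT B =====
-- B's data: the synonym groups as a plain list of lists (keys are never used)
def pvGroupsB : List (List String) := [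
  ["discount stores", "discount retail", "general merchandise stores", "hypermarkets and super centers", "warehouse clubs and superstores"],
  ["hypermarkets and super centers", "discount stores", "general merchandise stores", "warehouse clubs and superstores"],
  ["grocery stores", "supermarkets", "food retailers", "food and staples retailing"],
  ["department stores"],
  ["drug retailers", "pharmacies and drug stores"],
  ["internet retail", "e commerce", "internet and direct marketing retail"],
  ["packaged foods", "packaged foods and meats", "processed foods"],
  ["beverages non alcoholic", "non alcoholic beverages"],
  ["beverages breweries", "brewers"],
  ["household and personal products"],
  ["resorts and casinos", "casinos and gaming"],
  ["hotels and motels", "lodging"],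
  ["consumer electronics", "computer hardware"],
  ["software infrastructure", "software"],
  ["semiconductors", "semiconductor equipment and materials"]]

-- _MATCHES: phrase -> set of all phrases sharing a group with it (module-level loop of Source B)
def pvMatches : PySem.Dict String (PySem.Set String) :=
  pvGroupsB.foldl
    (fun d grp => grp.foldl (fun d p => (d.setdefault p PySem.Set.empty).modify p PySem.Set.empty (fun s => PySem.Set.update s grp)) d)
    PySem.Dict.empty

-- ch.isspace() or ch in ",/-().'"
def pvIsBreak (c : Char) : Bool := PySem.Chars.isspace c || [',', '/', '-', '(', ')', '.', '\''].contains c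

-- the loop body of _norm1: state = (words so far, current word)
def pvScanStep (st : List (List Char) × List Char) (c : Char) : List (List Char) × List Char :=
  if pvIsBreak c then (if st.2 = [] then st.1 else st.1 ++ [st.2], [])
  else if c = '&' then (st.1, st.2 ++ ['a', 'n', 'd'])
  else (st.1, st.2 ++ [PySem.Chars.lowerChar c])

-- _norm1 of Source B: one pass over the characters, then join the collected words
def pvNorm1 (s : String) : String :=
  let st := s.toList.foldl pvScanStep ([], [])
  let words := if st.2 = [] then st.1 else st.1 ++ [st.2]
  String.ofList (PySem.Chars.join [' '] words)

def industry_matches_alt (anchor_industry : String) (candidate_industry : String) : Bool :=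
  let a := pvNorm1 anchor_industry
  let c := pvNorm1 candidate_industry
  if a = "" ∨ c = "" then false
  else a = c || PySem.Set.contains (pvMatches.getD a PySem.Set.empty) c

-- ===== PRECONDITION & SPEC =====
def Spec_industry_matches (anchor_industry : String) (candidate_industry : String) (out : Bool) : Prop := out = industry_matches_alt anchor_industry candidate_industry
instance (anchor_industry : String) (candidate_industry : String) (out : Bool) : Decidable (Spec_industry_matches anchor_industry candidate_industry out) := by unfold Spec_industry_matches; infer_instance

-- ===== CLAIM (what is proved, stated in full; the proofs are below) =====
def Claim_equal_industry_matches : Prop := ∀ (anchor_industry : String) (candidate_industry : String), Dom_industry_matches anchor_industry candidate_industry → Spec_industry_matches anchor_industry candidate_industry (industry_matches anchor_industry candidate_industry)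

-- ===== LEMMAS AND PROOFS =====

-- per-character effect of A's whole replace pipeline
def pvG (c : Char) : List Char :=
  if c = '&' then ['a', 'n', 'd']
  else if [',', '/', '-', '(', ')', '.', '\''].contains c then [' ']
  else [PySem.Chars.lowerChar c]

-- replace with a single-character pattern is a flatMap
lemma pv_replace_go_single (p : Char) (new : List Char) :
    ∀ fuel l acc, l.length ≤ fuel →
      PySem.Chars.replace.go [p] new fuel l acc
        = acc.reverse ++ l.flatMap (fun c => if c = p then new else [c]) := by
  intro fuel
  induction fuel with
  | zero => intro l acc h; rw [List.length_eq_zero_iff.mp (Nat.le_zero.mp h)]; simp [PySem.Chars.replace.go]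
  | succ n ih =>
    intro l acc h
    cases l with
    | nil => simp [PySem.Chars.replace.go]
    | cons c t =>
      simp only [PySem.Chars.replace.go]
      by_cases hc : c = p
      · simp only [hc, List.isPrefixOf_cons₂, List.isPrefixOf_nil_left, BEq.rfl, Bool.and_self, if_true]
        rw [ih _ _ (by simpa using Nat.le_of_succ_le_succ h)]
        simp [List.flatMap_cons]
      · have : [p].isPrefixOf (c :: t) = false := by
          simp [List.isPrefixOf_cons₂]; exact fun h' => (hc h'.symm).elim
        rw [this]
        simp only [Bool.false_eq_true, if_false]
        rw [ih _ _ (by simpa using Nat.le_of_succ_le_succ h)]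
        simp [List.flatMap_cons, hc]

lemma pv_replace_single (p : Char) (new s : List Char) :
    PySem.Chars.replace s [p] new = s.flatMap (fun c => if c = p then new else [c]) := by
  simp [PySem.Chars.replace]
  exact pv_replace_go_single p new s.length s [] (le_refl _)

-- A's staged passes amount to flatMap pvG
lemma pv_pipeline (cs : List Char) :
    [',', '/', '-', '(', ')', '.', '\''].foldl
        (fun t ch => PySem.Chars.replace t [ch] [' '])
        (PySem.Chars.replace (PySem.Chars.lower cs) ['&'] ['a', 'n', 'd'])
      = cs.flatMap pvG := by
  induction cs with
  | nil => simp [PySem.Chars.lower, pv_replace_single]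
  | cons c t ih =>
    simp only [List.foldl_cons, List.foldl_nil] at ih ⊢
    simp only [PySem.Chars.lower, List.map_cons, pv_replace_single, List.flatMap_cons] at ih ⊢
    simp only [List.flatMap_append]
    rw [ih]
    refine congrArg (· ++ List.flatMap pvG t) ?_
    · -- head block: compute pvG c through the stages
      by_cases hu : PySem.Chars.isupper c
      · have hrange : 65 ≤ c.toNat ∧ c.toNat ≤ 90 := by
          simpa [PySem.Chars.isupper] using hu
        have hl : PySem.Chars.lowerChar c = Char.ofNat (c.toNat + 32) := by
          simp [PySem.Chars.lowerChar, hu]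
        have hv32 : (c.toNat + 32).isValidChar := Or.inl (by omega)
        have hval : (Char.ofNat (c.toNat + 32)).toNat = c.toNat + 32 := by
          rw [Char.ofNat, dif_pos hv32]; rfl
        have hne : ∀ d : Char, (d.toNat < 97 ∨ 122 < d.toNat) → Char.ofNat (c.toNat + 32) ≠ d := by
          intro d hd he
          rw [← he, hval] at hd
          omega
        rw [hl]
        have h1 : Char.ofNat (c.toNat + 32) ≠ '&' := hne '&' (by decide)
        have h2 : ∀ d ∈ [',', '/', '-', '(', ')', '.', '\''], Char.ofNat (c.toNat + 32) ≠ d := by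
          intro d hd
          fin_cases hd <;> exact hne _ (by decide)
        simp only [pvG, hl]
        have hc1 : c ≠ '&' := by intro h; rw [h] at hu; exact absurd hu (by decide)
        have hc2 : [',', '/', '-', '(', ')', '.', '\''].contains c = false := by
          simp only [List.contains_eq_mem, decide_eq_false_iff_not, List.mem_cons,
            List.not_mem_nil, or_false]
          rintro (rfl|rfl|rfl|rfl|rfl|rfl|rfl) <;> exact absurd hu (by decide)
        simp only [hc1, if_false, hc2, Bool.false_eq_true, if_false]
        simp [h1, (h2 ',' (by simp)), (h2 '/' (by simp)), (h2 '-' (by simp)),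
              (h2 '(' (by simp)), (h2 ')' (by simp)), (h2 '.' (by simp)), (h2 '\'' (by simp))]
      · have hl : PySem.Chars.lowerChar c = c := by simp [PySem.Chars.lowerChar, hu]
        rw [hl]
        by_cases h1 : c = '&'
        · subst h1; simp [pvG]
        · by_cases h2 : [',', '/', '-', '(', ')', '.', '\''].contains c
          · simp only [List.contains_eq_mem, decide_eq_true_eq, List.mem_cons] at h2
            rcases h2 with h|h|h|h|h|h|h|h <;> first | (subst h; simp [pvG]) | simp at h
          · simp only [pvG, h1, if_false, h2, Bool.false_eq_true, if_false]
            simp only [List.contains_eq_mem, decide_eq_true_eq, List.mem_cons] at h2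
            push_neg at h2
            obtain ⟨ha, hb, hc', hd, he, hf, hg, _⟩ := h2
            simp [h1, ha, hb, hc', hd, he, hf, hg, hl]

-- blocks of pvG: a break (whitespace or punctuation) gives a single whitespace char,
-- anything else gives only non-whitespace chars
lemma pv_g_break {c : Char} (h : pvIsBreak c = true) :
    ∃ sp, pvG c = [sp] ∧ PySem.Chars.isspace sp = true := by
  simp only [pvIsBreak, Bool.or_eq_true] at h
  rcases h with h | h
  · refine ⟨c, ?_, h⟩
    have h1 : c ≠ '&' := by rintro rfl; exact absurd h (by decide)
    have h2 : [',', '/', '-', '(', ')', '.', '\''].contains c = false := by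
      simp only [List.contains_eq_mem, decide_eq_false_iff_not, List.mem_cons,
        List.not_mem_nil, or_false]
      rintro (rfl|rfl|rfl|rfl|rfl|rfl|rfl) <;> exact absurd h (by decide)
    have h3 : PySem.Chars.lowerChar c = c := by
      have hu : PySem.Chars.isupper c = false := by
        by_contra hb
        have hu := eq_true_of_ne_false hb
        have hr : 65 ≤ c.toNat ∧ c.toNat ≤ 90 := by simpa [PySem.Chars.isupper] using hu
        have : PySem.Chars.isspace c = false := by
          simp only [PySem.Chars.isspace, Bool.or_eq_false_iff, Bool.and_eq_false_iff,
            decide_eq_false_iff_not]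
          omega
        rw [this] at h; exact absurd h (by decide)
      simp [PySem.Chars.lowerChar, hu]
    unfold pvG
    rw [if_neg h1, if_neg (by simp only [h2]; exact Bool.false_ne_true), h3]
  · refine ⟨' ', ?_, by decide⟩
    simp only [List.contains_eq_mem, decide_eq_true_eq, List.mem_cons,
      List.not_mem_nil, or_false] at h
    rcases h with rfl|rfl|rfl|rfl|rfl|rfl|rfl <;> rfl
lemma pv_g_word {c : Char} (h : pvIsBreak c = false) :
    (c = '&' ∧ pvG c = ['a', 'n', 'd']) ∨
    (c ≠ '&' ∧ pvG c = [PySem.Chars.lowerChar c] ∧ PySem.Chars.isspace (PySem.Chars.lowerChar c) = false) := by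
  simp only [pvIsBreak, Bool.or_eq_false_iff] at h
  obtain ⟨hsp, hpc⟩ := h
  by_cases h1 : c = '&'
  · exact Or.inl ⟨h1, by subst h1; simp [pvG]⟩
  · refine Or.inr ⟨h1, by
      unfold pvG
      rw [if_neg h1, if_neg (by simp only [hpc]; exact Bool.false_ne_true)], ?_⟩
    by_cases hu : PySem.Chars.isupper c
    · have hr : 65 ≤ c.toNat ∧ c.toNat ≤ 90 := by simpa [PySem.Chars.isupper] using hu
      have hv32 : (c.toNat + 32).isValidChar := Or.inl (by omega)
      have hval : (Char.ofNat (c.toNat + 32)).toNat = c.toNat + 32 := by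
        rw [Char.ofNat, dif_pos hv32]; rfl
      simp only [PySem.Chars.lowerChar, hu, if_true]
      simp only [PySem.Chars.isspace, hval]
      simp only [Bool.or_eq_false_iff, Bool.and_eq_false_iff, decide_eq_false_iff_not]
      omega
    · simp [PySem.Chars.lowerChar, hu, hsp]

-- the scan loop of B computes exactly split₀ of A's flatMapped character stream
lemma pv_scan_inv :
    ∀ (cs : List Char) (words : List (List Char)) (cur : List Char),
      PySem.Chars.split₀.go (cs.flatMap pvG) cur.reverse words.reverse
        = (let st := cs.foldl pvScanStep (words, cur);
           if st.2 = [] then st.1 else st.1 ++ [st.2]) := by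
  intro cs
  induction cs with
  | nil =>
    intro words cur
    simp only [List.flatMap_nil, List.foldl_nil, PySem.Chars.split₀.go]
    by_cases h : cur = []
    · simp [h]
    · have : cur.reverse.isEmpty = false := by
        simp [h]
      simp [this, h]
  | cons c t ih =>
    intro words cur
    simp only [List.flatMap_cons, List.foldl_cons]
    by_cases hb : pvIsBreak c = true
    · obtain ⟨sp, hg, hsp⟩ := pv_g_break hb
      rw [hg]
      simp only [List.cons_append, List.nil_append, PySem.Chars.split₀.go, hsp, if_true]
      by_cases h : cur = []
      · subst h
        simpa [pvScanStep, hb] using ih words []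
      · have hne : cur.reverse.isEmpty = false := by simp [h]
        rw [hne]
        simp only [Bool.false_eq_true, if_false]
        have : cur.reverse.reverse :: words.reverse = (words ++ [cur]).reverse := by simp
        rw [this]
        have := ih (words ++ [cur]) []
        simpa [pvScanStep, hb, h] using this
    · have hb' : pvIsBreak c = false := by simpa using hb
      rcases pv_g_word hb' with ⟨hamp, hg⟩ | ⟨hne, hg, hns⟩
      · rw [hg]
        simp only [List.cons_append, List.nil_append, PySem.Chars.split₀.go]
        have d1 : PySem.Chars.isspace 'a' = false := by decide
        have d2 : PySem.Chars.isspace 'n' = false := by decide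
        have d3 : PySem.Chars.isspace 'd' = false := by decide
        rw [d1]
        simp only [Bool.false_eq_true, if_false]
        rw [d2]
        simp only [Bool.false_eq_true, if_false]
        rw [d3]
        simp only [Bool.false_eq_true, if_false]
        have : 'd' :: 'n' :: 'a' :: cur.reverse = (cur ++ ['a', 'n', 'd']).reverse := by simp
        rw [this]
        have := ih words (cur ++ ['a', 'n', 'd'])
        simpa [pvScanStep, hb', hamp] using this
      · rw [hg]
        simp only [List.cons_append, List.nil_append, PySem.Chars.split₀.go, hns]
        simp only [Bool.false_eq_true, if_false]
        have : PySem.Chars.lowerChar c :: cur.reverse = (cur ++ [PySem.Chars.lowerChar c]).reverse := by simp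
        rw [this]
        have := ih words (cur ++ [PySem.Chars.lowerChar c])
        simpa [pvScanStep, hb', hne] using this

-- the two normalizers agree on every string
lemma pv_norm_eq (s : String) : pvNorm s = pvNorm1 s := by
  unfold pvNorm pvNorm1
  by_cases h : s = ""
  · subst h; rfl
  · simp only [h, if_false]
    apply String.toList_injective
    have hfold : ∀ t : String,
        ([",", "/", "-", "(", ")", ".", "'"].foldl (fun t ch => PySem.Str.replace t ch " ") t).toList
          = [',', '/', '-', '(', ')', '.', '\''].foldl (fun t ch => PySem.Chars.replace t [ch] [' ']) t.toList := by
      intro t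
      simp only [List.foldl_cons, List.foldl_nil, PySem.Str.toList_replace,
        (by decide : (",".toList) = [',']), (by decide : ("/".toList) = ['/']),
        (by decide : ("-".toList) = ['-']), (by decide : ("(".toList) = ['(']),
        (by decide : (")".toList) = [')']), (by decide : (".".toList) = ['.']),
        (by decide : ("'".toList) = ['\'']), (by decide : (" ".toList) = [' '])]
    have hseed : (PySem.Str.replace (PySem.Str.lower s) "&" "and").toList
        = PySem.Chars.replace (PySem.Chars.lower s.toList) ['&'] ['a', 'n', 'd'] := by
      simp only [PySem.Str.toList_replace, PySem.Str.lower, String.toList_ofList,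
        (by decide : ("&".toList) = ['&']), (by decide : ("and".toList) = ['a', 'n', 'd'])]
    have hpipe : ([",", "/", "-", "(", ")", ".", "'"].foldl (fun t ch => PySem.Str.replace t ch " ")
        (PySem.Str.replace (PySem.Str.lower s) "&" "and")).toList = s.toList.flatMap pvG := by
      rw [hfold, hseed]
      exact pv_pipeline s.toList
    simp only [PySem.Str.join, PySem.Str.split₀, String.toList_ofList, List.map_map,
      Function.comp_def, List.map_id', (by decide : (" ".toList) = [' '])]
    rw [hpipe]
    have hinv := pv_scan_inv s.toList [] []
    simp only [List.reverse_nil] at hinv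
    rw [PySem.Chars.split₀, hinv]

-- every phrase occurring in some synonym group of A
def pvPhrases : List String := pvSynonyms.flatMap (fun kg => kg.2)

set_option maxRecDepth 100000 in
lemma pv_keys_sub : ∀ k ∈ PySem.Dict.keys pvMatches, k ∈ pvPhrases := by decide

set_option maxRecDepth 100000 in
set_option maxHeartbeats 4000000 in
lemma pv_vals_sub : ∀ a ∈ pvPhrases, ∀ x ∈ (pvMatches.getD a PySem.Set.empty : PySem.Set String), x ∈ pvPhrases := by
  decide

set_option maxRecDepth 100000 in
set_option maxHeartbeats 4000000 in
lemma pv_finpairs : ∀ a ∈ pvPhrases, ∀ c ∈ pvPhrases, a ≠ c →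
    (pvSynonyms.any (fun kg => PySem.Set.contains kg.2 a && PySem.Set.contains kg.2 c))
    = PySem.Set.contains (pvMatches.getD a PySem.Set.empty) c := by
  decide

lemma pv_getD_of_not_phrase {x : String} (hx : x ∉ pvPhrases) :
    pvMatches.getD x PySem.Set.empty = PySem.Set.empty := by
  have hk : x ∉ PySem.Dict.keys pvMatches := fun h => hx (pv_keys_sub x h)
  have hn : pvMatches.get? x = none := (PySem.Dict.get?_eq_none_iff_not_mem_keys pvMatches x).mpr hk
  exact PySem.Dict.getD_of_get?_eq_none pvMatches PySem.Set.empty hn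

lemma pv_any_false_left {a c : String} (ha : a ∉ pvPhrases) :
    pvSynonyms.any (fun kg => PySem.Set.contains kg.2 a && PySem.Set.contains kg.2 c) = false := by
  rw [List.any_eq_false]
  intro kg hkg
  have hm : a ∉ kg.2 := fun h => ha (List.mem_flatMap.mpr ⟨kg, hkg, h⟩)
  simp [PySem.Set.contains_eq_listContains, hm]

lemma pv_any_false_right {a c : String} (hc : c ∉ pvPhrases) :
    pvSynonyms.any (fun kg => PySem.Set.contains kg.2 a && PySem.Set.contains kg.2 c) = false := by
  rw [List.any_eq_false]
  intro kg hkg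
  have hm : c ∉ kg.2 := fun h => hc (List.mem_flatMap.mpr ⟨kg, hkg, h⟩)
  simp [PySem.Set.contains_eq_listContains, hm]

-- the group scan of A agrees with the index lookup of B (for distinct normalized strings)
lemma pv_loop_eq (a c : String) (hac : a ≠ c) :
    (pvSynonyms.any (fun kg => PySem.Set.contains kg.2 a && PySem.Set.contains kg.2 c))
    = PySem.Set.contains (pvMatches.getD a PySem.Set.empty) c := by
  by_cases ha : a ∈ pvPhrases
  · by_cases hc : c ∈ pvPhrases
    · exact pv_finpairs a ha c hc hac
    · rw [pv_any_false_right hc]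
      have hm : c ∉ (pvMatches.getD a PySem.Set.empty : PySem.Set String) :=
        fun h => hc (pv_vals_sub a ha c h)
      simp only [PySem.Set.contains_eq_listContains]
      simpa using hm
  · rw [pv_any_false_left ha, pv_getD_of_not_phrase ha]
    rfl

-- ===== VERDICT (by name: the statement is the Claim_ definition above) =====
theorem industry_matches_spec : Claim_equal_industry_matches := by
  intro x y _
  unfold Spec_industry_matches industry_matches industry_matches_alt
  rw [pv_norm_eq x, pv_norm_eq y]
  by_cases h1 : pvNorm1 x = "" ∨ pvNorm1 y = ""
  · simp [h1]
  · by_cases h2 : pvNorm1 x = pvNorm1 y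
    · simp [h2]
    · simp only [if_neg h1, if_neg h2, decide_eq_false h2, Bool.false_or]
      exact pv_loop_eq _ _ h2
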